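-- pv_equiv track=rewrite | github.com/ariel-lindemann/aoc_2023 | day03/day03.py | _expand_point
-- ===== SOURCE A (Python) =====
-- def _expand_point(grid: list[list[bool]], x: int, y: int) -> list[list[bool]]:
--     expanded = [row[:] for row in grid]
--     x_range = range(max(0, x-1), min(x+2, len(grid)))
--     y_range = range(max(0, y-1), min(y+2, len(grid[0])))
--     for i in x_range:
--         for j in y_range:
--             expanded[i][j] = True
--
--     return expanded
-- ===== SOURCE B (Python) =====
-- def _expand_point(grid: list[list[bool]], x: int, y: int) -> list[list[bool]]:
--     return [[cell or (abs(i - x) <= 1 and abs(j - y) <= 1)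
--              for j, cell in enumerate(row)]
--             for i, row in enumerate(grid)]
-- ===== Notes on version B (the rewrite author's own statement) =====
-- stated objective: simpler
-- what changed: Replaced A's copy-then-patch structure (copy every row, then two nested index loops writing True into a clamped 3x3 window) with a single nested comprehension that computes each cell directly as `cell or (abs(i-x)<=1 and abs(j-y)<=1)`.
-- outside the precondition, e.g. on _expand_point([], 0, 0): A raises IndexError, B returns []
import Mathlib
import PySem

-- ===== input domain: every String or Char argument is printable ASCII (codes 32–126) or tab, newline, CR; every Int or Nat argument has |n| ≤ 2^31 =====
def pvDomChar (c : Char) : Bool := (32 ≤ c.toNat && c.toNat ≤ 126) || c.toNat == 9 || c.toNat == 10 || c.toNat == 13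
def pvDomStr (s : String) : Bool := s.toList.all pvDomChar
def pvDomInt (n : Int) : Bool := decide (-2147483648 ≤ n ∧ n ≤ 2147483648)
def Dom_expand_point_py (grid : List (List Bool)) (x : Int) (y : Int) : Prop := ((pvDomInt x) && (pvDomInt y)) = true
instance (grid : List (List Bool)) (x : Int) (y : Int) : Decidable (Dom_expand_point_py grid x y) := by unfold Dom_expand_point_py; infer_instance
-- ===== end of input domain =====

-- B replaces A's copy-then-patch index loops by a single nested comprehension computing each
-- cell from the 3x3-neighbourhood predicate (objective: simpler).


-- ===== PORT A =====
def expand_point_py (grid : List (List Bool)) (x : Int) (y : Int) : List (List Bool) :=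
  let expanded := grid.map (fun row => row)   -- row[:] copies; functionally the identity
  let x_range := PySem.List.pyRange (max 0 (x - 1)) (min (x + 2) (grid.length : Int)) 1
  let y_range := PySem.List.pyRange (max 0 (y - 1)) (min (y + 2) ((PySem.List.pyGetD grid 0 []).length : Int)) 1
  x_range.foldl (fun g i =>
    y_range.foldl (fun g2 j =>
      PySem.List.pySetD g2 i (PySem.List.pySetD (PySem.List.pyGetD g2 i []) j true)) g) expanded

-- ===== PORT B =====
def expand_point_py_alt (grid : List (List Bool)) (x : Int) (y : Int) : List (List Bool) :=
  (PySem.List.enumerate grid 0).map (fun ir =>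
    (PySem.List.enumerate ir.2 0).map (fun jc =>
      jc.2 || decide (|ir.1 - x| ≤ 1 ∧ |jc.1 - y| ≤ 1)))

-- ===== PRECONDITION & SPEC =====
-- Pre_ excludes the empty grid, on which A raises IndexError at len(grid[0]), and ragged grids
-- whose rows in the affected x-band differ in length from row 0, on which A's clamping of the
-- patch to row 0's length is an accident of its implementation (it raises or silently
-- truncates/extends the patch depending on row 0's length).
def Pre_expand_point_py (grid : List (List Bool)) (x : Int) (y : Int) : Prop :=
  grid ≠ [] ∧ ∀ k : Nat, k < grid.length → x - 1 ≤ (k : Int) → (k : Int) ≤ x + 1 →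
    (grid.getD k []).length = (grid.headD []).length
instance (grid : List (List Bool)) (x : Int) (y : Int) : Decidable (Pre_expand_point_py grid x y) := by unfold Pre_expand_point_py; infer_instance

def pvWitness_expand_point_py : List (List Bool) × Int × Int := ([[false, true], [true, false]], 0, 1)

def Spec_expand_point_py (grid : List (List Bool)) (x : Int) (y : Int) (out : List (List Bool)) : Prop := out = expand_point_py_alt grid x y
instance (grid : List (List Bool)) (x : Int) (y : Int) (out : List (List Bool)) : Decidable (Spec_expand_point_py grid x y out) := by unfold Spec_expand_point_py; infer_instance

-- ===== CLAIM (what is proved, stated in full; the proofs are below) =====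
def Claim_equal_expand_point_py : Prop := ∀ (grid : List (List Bool)) (x : Int) (y : Int), Dom_expand_point_py grid x y → Pre_expand_point_py grid x y → Spec_expand_point_py grid x y (expand_point_py grid x y)

-- ===== LEMMAS AND PROOFS =====

-- length is preserved by a fold of in-place updates
lemma pv_foldl_len {α : Type} (F : α → α) (d : α) (L : List Int) (g : List α) :
    (L.foldl (fun h i => h.set i.toNat (F (h.getD i.toNat d))) g).length = g.length := by
  induction L generalizing g with
  | nil => rfl
  | cons i L ih => rw [List.foldl_cons, ih]; simp

-- pointwise value of a fold of in-place updates over distinct nonnegative in-range indices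
lemma pv_foldl_get {α : Type} (F : α → α) (d : α) :
    ∀ (L : List Int) (g : List α), L.Nodup → (∀ i ∈ L, 0 ≤ i ∧ i < (g.length : Int)) →
    ∀ k : Nat, k < g.length →
    (L.foldl (fun h i => h.set i.toNat (F (h.getD i.toNat d))) g).getD k d
      = if (k : Int) ∈ L then F (g.getD k d) else g.getD k d := by
  intro L
  induction L with
  | nil => intro g _ _ k hk; simp
  | cons i L ih =>
    intro g hnd hb k hk
    obtain ⟨hi0, hilt⟩ := hb i (by simp)
    rw [List.foldl_cons]
    by_cases hki : (k : Int) = i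
    · have hkn : k = i.toNat := by omega
      have hniL : (k : Int) ∉ L := by
        subst hki; exact (List.nodup_cons.mp hnd).1
      rw [ih _ (List.nodup_cons.mp hnd).2
            (by intro a ha; simpa using hb a (by simp [ha]))
            k (by simpa using hk), if_neg hniL, if_pos (by simp [hki])]
      have hlen : i.toNat < g.length := by omega
      subst hkn
      rw [List.getD_eq_getElem _ _ (by simpa using hlen), List.getElem_set_self,
          List.getD_eq_getElem _ _ hlen]
    · have hset : (g.set i.toNat (F (g.getD i.toNat d))).getD k d = g.getD k d := by
        simp [List.getD_eq_getElem?_getD, List.getElem?_set_ne (by omega : i.toNat ≠ k)]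
      rw [ih _ (List.nodup_cons.mp hnd).2
            (by intro a ha; simpa using hb a (by simp [ha]))
            k (by simpa using hk), hset]
      simp [hki]

-- one inner pass over y_range equals an in-place functional update of row i
lemma pv_inner_step (yr : List Int) (hy : ∀ j ∈ yr, 0 ≤ j) (i : Int)
    (hi0 : 0 ≤ i) :
    ∀ (g : List (List Bool)), i < (g.length : Int) →
    yr.foldl (fun g2 j =>
      PySem.List.pySetD g2 i (PySem.List.pySetD (PySem.List.pyGetD g2 i []) j true)) g
    = g.set i.toNat (yr.foldl (fun r j => r.set j.toNat true) (g.getD i.toNat [])) := by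
  induction yr with
  | nil =>
    intro g hilt
    have hlen : i.toNat < g.length := by omega
    rw [List.foldl_nil, List.foldl_nil, List.getD_eq_getElem _ _ hlen, List.set_getElem_self]
  | cons j yr ih =>
    intro g hilt
    have hj0 : 0 ≤ j := hy j (by simp)
    have hlen : i.toNat < g.length := by omega
    rw [List.foldl_cons,
        PySem.List.pyGetD_eq_getElem g [] hi0 hilt,
        PySem.List.pySetD_of_nonneg _ _ hj0,
        PySem.List.pySetD_of_nonneg _ _ hi0,
        ih (fun a ha => hy a (by simp [ha])) _ (by simpa using hilt),
        List.set_set, List.foldl_cons]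
    congr 2
    rw [List.getD_eq_getElem _ _ (by simpa using hlen), List.getElem_set_self,
        List.getD_eq_getElem _ _ hlen]

-- the whole of A's double loop in the canonical in-place-update shape
lemma pv_outer (yr : List Int) (hy : ∀ j ∈ yr, 0 ≤ j) :
    ∀ (L : List Int) (g : List (List Bool)), (∀ i ∈ L, 0 ≤ i ∧ i < (g.length : Int)) →
    L.foldl (fun g i =>
      yr.foldl (fun g2 j =>
        PySem.List.pySetD g2 i (PySem.List.pySetD (PySem.List.pyGetD g2 i []) j true)) g) g
    = L.foldl (fun h i =>
        h.set i.toNat ((fun r => yr.foldl (fun r j => r.set j.toNat true) r) (h.getD i.toNat []))) g := by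
  intro L
  induction L with
  | nil => intro g _; rfl
  | cons i L ih =>
    intro g hb
    obtain ⟨hi0, hilt⟩ := hb i (by simp)
    rw [List.foldl_cons, List.foldl_cons, pv_inner_step yr hy i hi0 g hilt]
    exact ih _ (by intro a ha; simpa using hb a (by simp [ha]))

-- ===== VERDICT (by name: the statement is the Claim_ definition above) =====
theorem expand_point_py_spec : Claim_equal_expand_point_py := by
  intro grid x y _ hpre
  obtain ⟨hne, hrect⟩ := hpre
  unfold Spec_expand_point_py expand_point_py expand_point_py_alt
  have hcols0 : PySem.List.pyGetD grid 0 [] = grid.headD [] := by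
    rw [PySem.List.pyGetD_zero]
    cases grid with
    | nil => rfl
    | cons a l => rfl
  dsimp only
  rw [List.map_id', hcols0]
  set cols : Nat := (grid.headD []).length with hcolsdef
  set xr := PySem.List.pyRange (max 0 (x - 1)) (min (x + 2) (grid.length : Int)) 1 with hxr
  set yr := PySem.List.pyRange (max 0 (y - 1)) (min (y + 2) (cols : Int)) 1 with hyr
  have hxb : ∀ i ∈ xr, 0 ≤ i ∧ i < (grid.length : Int) := by
    intro i hi; rw [hxr, PySem.List.mem_pyRange_one] at hi; omega
  have hyb : ∀ j ∈ yr, 0 ≤ j ∧ j < (cols : Int) := by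
    intro j hj; rw [hyr, PySem.List.mem_pyRange_one] at hj; omega
  rw [pv_outer yr (fun j hj => (hyb j hj).1) xr grid hxb]
  have hndx : xr.Nodup := by rw [hxr]; exact PySem.List.nodup_pyRange_one _ _
  have hndy : yr.Nodup := by rw [hyr]; exact PySem.List.nodup_pyRange_one _ _
  have hlen1 : (xr.foldl (fun h i => h.set i.toNat
      ((fun r => yr.foldl (fun r j => r.set j.toNat true) r) (h.getD i.toNat []))) grid).length
      = grid.length :=
    pv_foldl_len (fun r => yr.foldl (fun r j => r.set j.toNat true) r) ([] : List Bool) xr grid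
  apply List.ext_getElem
  · rw [hlen1]
    simp [PySem.List.length_enumerate]
  intro k hk1 hk2
  have hkg : k < grid.length := by omega
  have hkR : (k : Int) < (grid.length : Int) := by exact_mod_cast hkg
  have hget1 : (xr.foldl (fun h i => h.set i.toNat
      ((fun r => yr.foldl (fun r j => r.set j.toNat true) r) (h.getD i.toNat []))) grid).getD k []
      = if (k : Int) ∈ xr then yr.foldl (fun r j => r.set j.toNat true) (grid.getD k [])
        else grid.getD k [] :=
    pv_foldl_get (fun r => yr.foldl (fun r j => r.set j.toNat true) r) ([] : List Bool)
      xr grid hndx hxb k hkg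
  have hRHS : ((PySem.List.enumerate grid 0).map (fun ir =>
      (PySem.List.enumerate ir.2 0).map (fun jc =>
        jc.2 || decide (|ir.1 - x| ≤ 1 ∧ |jc.1 - y| ≤ 1))))[k]
    = (PySem.List.enumerate grid[k] 0).map (fun jc =>
        jc.2 || decide (|(k : Int) - x| ≤ 1 ∧ |jc.1 - y| ≤ 1)) := by
    simp [PySem.List.getElem_enumerate]
  rw [hRHS, ← List.getD_eq_getElem _ ([] : List Bool) hk1, hget1,
      List.getD_eq_getElem _ _ hkg]
  by_cases hkx : (k : Int) ∈ xr
  · rw [if_pos hkx]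
    rw [hxr, PySem.List.mem_pyRange_one] at hkx
    have habsx : |(k : Int) - x| ≤ 1 := by rw [abs_le]; omega
    have hrowlen : grid[k].length = cols := by
      have h := hrect k hkg (by omega) (by omega)
      rwa [List.getD_eq_getElem _ _ hkg] at h
    have hlen2 : (yr.foldl (fun r j => r.set j.toNat true) grid[k]).length = grid[k].length :=
      pv_foldl_len (fun _ => true) false yr grid[k]
    apply List.ext_getElem
    · rw [hlen2]
      simp [PySem.List.length_enumerate]
    intro j hj1 hj2
    have hjg : j < grid[k].length := by omega
    have hjc : (j : Int) < (cols : Int) := by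
      rw [← hrowlen]; exact_mod_cast hjg
    have hyb' : ∀ a ∈ yr, 0 ≤ a ∧ a < (grid[k].length : Int) := by
      intro a ha
      have := hyb a ha
      rw [hrowlen]; exact this
    have hget2 : (yr.foldl (fun r j => r.set j.toNat true) grid[k]).getD j false
        = if (j : Int) ∈ yr then true else grid[k].getD j false :=
      pv_foldl_get (fun _ => true) false yr grid[k] hndy hyb' j hjg
    rw [← List.getD_eq_getElem _ false hj1, hget2]
    simp only [PySem.List.getElem_enumerate, List.getElem_map, zero_add]
    by_cases hjy : (j : Int) ∈ yr
    · rw [if_pos hjy]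
      rw [hyr, PySem.List.mem_pyRange_one] at hjy
      have habsy : |(j : Int) - y| ≤ 1 := by rw [abs_le]; omega
      rw [decide_eq_true ⟨habsx, habsy⟩, Bool.or_true]
    · rw [if_neg hjy]
      rw [hyr, PySem.List.mem_pyRange_one] at hjy
      have habsy : ¬ (|(k : Int) - x| ≤ 1 ∧ |(j : Int) - y| ≤ 1) := by
        rw [abs_le, abs_le]; omega
      rw [decide_eq_false habsy, Bool.or_false, List.getD_eq_getElem _ _ hjg]
  · rw [if_neg hkx]
    rw [hxr, PySem.List.mem_pyRange_one] at hkx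
    have habsx : ¬ |(k : Int) - x| ≤ 1 := by rw [abs_le]; omega
    apply List.ext_getElem
    · simp [PySem.List.length_enumerate]
    intro j hj1 hj2
    simp only [PySem.List.getElem_enumerate, List.getElem_map, zero_add]
    have hd : ¬ (|(k : Int) - x| ≤ 1 ∧ |(j : Int) - y| ≤ 1) := fun h => habsx h.1
    rw [decide_eq_false hd, Bool.or_false]
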